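-- pv_equiv track=rewrite | github.com/kvillagran/InvestigacionDSS | Cliente.py | ejecutar_segun_orden
-- ===== SOURCE A (Python) =====
-- def xor_binario(b1, b2):
--     return ''.join('0' if b1[i] == b2[i] else '1' for i in range(64))
--
-- def binary_not(b):
--     return ''.join('1' if bit == '0' else '0' for bit in b)
--
-- def rotar_izquierda_bits(b, n):
--     return b[n % 64:] + b[:n % 64]
--
-- def sustituir_bit(b, p):
--     return b[:p] + '0' + b[p+1:]
--
-- def xornot(b1, b2):
--     return xor_binario(b1, binary_not(b2))
--
-- def xor_sust(b1, b2, p):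
--     return xor_binario(b1, sustituir_bit(b2, p))
--
-- def xor_rot(b1, b2, p):
--     return xor_binario(b1, rotar_izquierda_bits(b2, p))
--
-- def ejecutar_segun_orden(psn, mensaje, K):
--     for numero in psn:
--         if numero == '1':
--             mensaje = xornot(mensaje, K)
--         elif numero == '2':
--             mensaje = xor_sust(mensaje, K, int(psn[0]))
--         elif numero == '3':
--             mensaje = xor_rot(mensaje, K, int(psn[-1]))
--         elif numero == '4':
--             mensaje = xor_binario(mensaje, K)
--     return mensaje
-- ===== SOURCE B (Python) =====
-- def ejecutar_segun_orden(psn, mensaje, K):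
--     ops = [c for c in psn if c in '1234']
--     if not ops:
--         return mensaje
--     m1 = ''.join('1' if c == '0' else '0' for c in K)
--     m4 = K
--     m2 = m4
--     m3 = m4
--     if '2' in ops:
--         p = int(psn[0])
--         m2 = K[:p] + '0' + K[p+1:]
--     if '3' in ops:
--         r = int(psn[-1]) % 64
--         m3 = K[r:] + K[:r]
--     out = []
--     for i in range(64):
--         x = mensaje[i]
--         for t in ops:
--             mk = m1 if t == '1' else m2 if t == '2' else m3 if t == '3' else m4
--             x = '0' if x == mk[i] else '1'
--         out.append(x)
--     return ''.join(out)
-- ===== Notes on version B (the rewrite author's own statement) =====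
-- stated objective: faster
-- what changed: B filters the op characters once, computes each of the four XOR masks a single time up front (A rebuilds not(K)/substituted-K/rotated-K and a fresh 64-char string on every iteration), and then computes the result column-wise with one fold over the op sequence per bit position.
import Mathlib
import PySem

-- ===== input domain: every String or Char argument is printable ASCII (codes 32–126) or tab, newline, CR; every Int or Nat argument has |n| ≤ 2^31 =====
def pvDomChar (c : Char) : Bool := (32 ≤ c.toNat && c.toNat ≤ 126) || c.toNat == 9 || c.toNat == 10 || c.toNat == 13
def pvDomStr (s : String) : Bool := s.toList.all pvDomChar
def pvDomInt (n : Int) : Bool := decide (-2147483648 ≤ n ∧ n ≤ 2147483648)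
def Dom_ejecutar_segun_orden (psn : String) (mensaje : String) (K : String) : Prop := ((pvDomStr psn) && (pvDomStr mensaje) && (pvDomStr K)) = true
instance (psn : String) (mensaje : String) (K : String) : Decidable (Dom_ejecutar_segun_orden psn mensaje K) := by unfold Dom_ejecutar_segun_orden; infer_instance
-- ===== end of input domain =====

-- B filters the op characters once, computes each XOR mask a single time up front, and
-- computes the result column-wise (one fold over the op list per bit position) instead of
-- rebuilding the masks and a 64-char string on every op, as A does.

-- ===== PORT A =====
-- indices are only read under Pre_ (64 ≤ length), so getD with a dummy default is exact there
def pvXorBin (b1 b2 : List Char) : List Char :=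
  (List.range 64).map (fun i => if b1.getD i ' ' == b2.getD i ' ' then '0' else '1')
def pvBinaryNot (b : List Char) : List Char := b.map (fun c => if c == '0' then '1' else '0')
def pvRotIzq (b : List Char) (n : Nat) : List Char := b.drop (n % 64) ++ b.take (n % 64)
-- exact for the nonnegative p Pre_ admits (psn[0]/psn[-1] is a digit)
def pvSustituir (b : List Char) (p : Nat) : List Char := b.take p ++ ['0'] ++ b.drop (p + 1)
def pvXornot (b1 b2 : List Char) : List Char := pvXorBin b1 (pvBinaryNot b2)
def pvXorSust (b1 b2 : List Char) (p : Nat) : List Char := pvXorBin b1 (pvSustituir b2 p)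
def pvXorRot (b1 b2 : List Char) (p : Nat) : List Char := pvXorBin b1 (pvRotIzq b2 p)
-- int(<one-char string>); Pre_ guarantees the char is a digit, so the defaults are never hit
def pvDigit (c : Char) : Nat := ((PySem.Int.ofChars? [c]).getD 0).toNat

def ejecutar_segun_orden (psn : String) (mensaje : String) (K : String) : String :=
  let psnl := psn.toList
  let Kl := K.toList
  String.ofList (psnl.foldl (fun m c =>
    if c == '1' then pvXornot m Kl
    else if c == '2' then pvXorSust m Kl (pvDigit (psnl.getD 0 ' '))
    else if c == '3' then pvXorRot m Kl (pvDigit (psnl.getLast?.getD ' '))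
    else if c == '4' then pvXorBin m Kl
    else m) mensaje.toList)

-- ===== PORT B =====
-- c in '1234'
def pvIsOp (c : Char) : Bool := c == '1' || c == '2' || c == '3' || c == '4'
-- int(<one-char string>), B's own copy
def pvDigitB (c : Char) : Nat := ((PySem.Int.ofChars? [c]).getD 0).toNat

def ejecutar_segun_orden_alt (psn : String) (mensaje : String) (K : String) : String :=
  let psnl := psn.toList
  let Kl := K.toList
  let ops := psnl.filter pvIsOp
  if ops = [] then mensaje
  else
    let m1 := Kl.map (fun c => if c == '0' then '1' else '0')
    let m4 := Kl
    let m2 := if '2' ∈ ops then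
        Kl.take (pvDigitB (psnl.getD 0 ' ')) ++ ['0'] ++ Kl.drop (pvDigitB (psnl.getD 0 ' ') + 1)
      else m4
    let m3 := if '3' ∈ ops then
        Kl.drop (pvDigitB (psnl.getLast?.getD ' ') % 64) ++ Kl.take (pvDigitB (psnl.getLast?.getD ' ') % 64)
      else m4
    String.ofList ((List.range 64).map (fun i =>
      ops.foldl (fun x t =>
        if x == (if t == '1' then m1 else if t == '2' then m2
                 else if t == '3' then m3 else m4).getD i ' ' then '0' else '1')
        (mensaje.toList.getD i ' ')))

-- ===== PRECONDITION & SPEC =====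
-- Pre_ excludes exactly the inputs on which A raises: IndexError when some op char ('1'-'4')
-- occurs in psn but mensaje or K is shorter than 64, and ValueError when op '2' (resp. '3')
-- occurs but psn[0] (resp. psn[-1]) is not a decimal digit.
def Pre_ejecutar_segun_orden (psn : String) (mensaje : String) (K : String) : Prop :=
  ((psn.toList.any pvIsOp) = true →
      64 ≤ mensaje.toList.length ∧ 64 ≤ K.toList.length) ∧
  ('2' ∈ psn.toList → (psn.toList.getD 0 ' ').isDigit = true) ∧
  ('3' ∈ psn.toList → (psn.toList.getLast?.getD ' ').isDigit = true)
instance (psn : String) (mensaje : String) (K : String) : Decidable (Pre_ejecutar_segun_orden psn mensaje K) := by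
  unfold Pre_ejecutar_segun_orden; infer_instance

def pvWitness_ejecutar_segun_orden : String × String × String :=
  ("1234", String.ofList (List.replicate 64 '0'), String.ofList (List.replicate 64 '1'))

def Spec_ejecutar_segun_orden (psn : String) (mensaje : String) (K : String) (out : String) : Prop := out = ejecutar_segun_orden_alt psn mensaje K
instance (psn : String) (mensaje : String) (K : String) (out : String) : Decidable (Spec_ejecutar_segun_orden psn mensaje K out) := by unfold Spec_ejecutar_segun_orden; infer_instance

-- ===== CLAIM (what is proved, stated in full; the proofs are below) =====
def Claim_equal_ejecutar_segun_orden : Prop := ∀ (psn : String) (mensaje : String) (K : String), Dom_ejecutar_segun_orden psn mensaje K → Pre_ejecutar_segun_orden psn mensaje K → Spec_ejecutar_segun_orden psn mensaje K (ejecutar_segun_orden psn mensaje K)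

-- ===== LEMMAS AND PROOFS =====

lemma pvDigitB_eq_pvDigit (c : Char) : pvDigitB c = pvDigit c := rfl

-- the per-op mask A XORs the message with
def pvMaskA (Kl : List Char) (p0 p1 : Nat) (c : Char) : List Char :=
  if c == '1' then pvBinaryNot Kl
  else if c == '2' then pvSustituir Kl p0
  else if c == '3' then pvRotIzq Kl p1
  else Kl

lemma pv_getD_map_range64 (g : Nat → Char) (i : Nat) (h : i ∈ List.range 64) :
    ((List.range 64).map g).getD i ' ' = g i := by
  simp [List.getD_eq_getElem?_getD, List.mem_range.mp h]

-- A's fold over psn is the fold of XOR-with-mask over the filtered op list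
lemma pvA_eq_fold_ops (psn mensaje K : String) :
    ejecutar_segun_orden psn mensaje K
      = String.ofList ((psn.toList.filter pvIsOp).foldl
          (fun m t => pvXorBin m (pvMaskA K.toList
              (pvDigit (psn.toList.getD 0 ' ')) (pvDigit (psn.toList.getLast?.getD ' ')) t))
          mensaje.toList) := by
  simp only [ejecutar_segun_orden]
  rw [List.foldl_filter]
  congr 1
  apply PySem.List.foldl_congr_mem
  intro m c _
  by_cases h1 : c = '1'
  · simp [h1, pvIsOp, pvMaskA, pvXornot]
  · by_cases h2 : c = '2'
    · simp [h2, pvIsOp, pvMaskA, pvXorSust]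
    · by_cases h3 : c = '3'
      · simp [h3, pvIsOp, pvMaskA, pvXorRot]
      · by_cases h4 : c = '4'
        · simp [h4, pvIsOp, pvMaskA]
        · simp [h1, h2, h3, h4, pvIsOp]

-- folding XOR-with-mask over strings = per-position folds over the op list
lemma pvFoldXor (mask : Char → List Char) (ts : List Char) :
    ∀ g : Nat → Char,
    ts.foldl (fun m t => pvXorBin m (mask t)) ((List.range 64).map g)
      = (List.range 64).map (fun i =>
          ts.foldl (fun x t => if x == (mask t).getD i ' ' then '0' else '1') (g i)) := by
  induction ts with
  | nil => intro g; rfl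
  | cons t ts ih =>
    intro g
    have h1 : pvXorBin ((List.range 64).map g) (mask t)
        = (List.range 64).map (fun i => if g i == (mask t).getD i ' ' then '0' else '1') := by
      unfold pvXorBin
      apply List.map_congr_left
      intro i hi
      rw [pv_getD_map_range64 g i hi]
    rw [List.foldl_cons, h1, ih]
    simp only [List.foldl_cons]

-- B's conditionally-precomputed mask agrees with A's per-op mask on every op in the list
lemma pvMaskB_eq (Kl : List Char) (p0 p1 : Nat) (ops : List Char) (u : Char) (hu : u ∈ ops) :
    (if u == '1' then Kl.map (fun c => if c == '0' then '1' else '0')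
     else if u == '2' then
       (if '2' ∈ ops then Kl.take p0 ++ ['0'] ++ Kl.drop (p0 + 1) else Kl)
     else if u == '3' then
       (if '3' ∈ ops then Kl.drop (p1 % 64) ++ Kl.take (p1 % 64) else Kl)
     else Kl)
    = pvMaskA Kl p0 p1 u := by
  by_cases h1 : u = '1'
  · simp [h1, pvMaskA, pvBinaryNot]
  · by_cases h2 : u = '2'
    · subst h2; simp [hu, pvMaskA, pvSustituir]
    · by_cases h3 : u = '3'
      · subst h3; simp [hu, pvMaskA, pvRotIzq]
      · simp [h1, h2, h3, pvMaskA]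

-- ===== VERDICT (by name: the statement is the Claim_ definition above) =====
theorem ejecutar_segun_orden_spec : Claim_equal_ejecutar_segun_orden := by
  intro psn mensaje K _hDom _hPre
  unfold Spec_ejecutar_segun_orden
  rw [pvA_eq_fold_ops]
  simp only [ejecutar_segun_orden_alt, pvDigitB_eq_pvDigit]
  cases hops : psn.toList.filter pvIsOp with
  | nil => simp
  | cons t ts =>
    rw [if_neg (List.cons_ne_nil t ts)]
    congr 1
    rw [List.foldl_cons,
        show pvXorBin mensaje.toList (pvMaskA K.toList (pvDigit (psn.toList.getD 0 ' '))
            (pvDigit (psn.toList.getLast?.getD ' ')) t)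
          = (List.range 64).map (fun i =>
              if mensaje.toList.getD i ' ' == (pvMaskA K.toList (pvDigit (psn.toList.getD 0 ' '))
                  (pvDigit (psn.toList.getLast?.getD ' ')) t).getD i ' ' then '0' else '1') from rfl,
        pvFoldXor]
    apply List.map_congr_left
    intro i _hi
    rw [List.foldl_cons]
    rw [pvMaskB_eq K.toList _ _ (t :: ts) t (List.mem_cons_self ..)]
    exact (PySem.List.foldl_congr_mem ts _ _ _ (fun acc u hu => by
      rw [pvMaskB_eq K.toList _ _ (t :: ts) u (List.mem_cons_of_mem _ hu)])).symm
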